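-- pv_equiv track=rewrite | github.com/HmmOrange/page_replacement_algo | algo.py | mfu
-- ===== SOURCE A (Python) =====
-- from collections import defaultdict, deque
--
-- def mfu(pages, frame_size):
--     page_frame = [None] * frame_size
--     page_faults = 0
--     history = []
--
--     use_count = defaultdict(int)
--     recently_used_queue = deque([])
--
--     for page in pages:
--         if page in page_frame:
--             recently_used_queue.remove(page)
--             recently_used_queue.append(page)
--         else:
--             in_queue = False
--             for i in range(len(page_frame)):
--                 if page_frame[i] == None:
--                     page_frame[i] = page
--                     recently_used_queue.append(page)
--                     in_queue = True
--                     break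
--
--             if not in_queue:
--                 replaced_page, count = -1, -1
--
--                 # Find MFU page. If there are more than 2 pages with the same count, consider LRU
--                 for page_in_queue in recently_used_queue:
--                     if use_count[page_in_queue] > count:
--                         replaced_page, count = page_in_queue, use_count[page_in_queue]
--
--                 recently_used_queue.remove(replaced_page)
--                 page_frame[page_frame.index(replaced_page)] = page
--
--                 recently_used_queue.append(page)
--
--             page_faults += 1
--
--         if page in use_count:
--             use_count[page] += 1
--         else:
--             use_count[page] = 1
--
--         history.append(page_frame.copy())
--     return page_faults, history
-- ===== SOURCE B (Python) =====
-- def mfu(pages, frame_size):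
--     page_frame = [None] * frame_size
--     page_faults = 0
--     history = []
--     use_count = {}
--     last_seen = {}
--     for i, page in enumerate(pages):
--         if page not in page_frame:
--             if None in page_frame:
--                 page_frame[page_frame.index(None)] = page
--             else:
--                 victim = min(page_frame, key=lambda p: (-use_count[p], last_seen[p]))
--                 page_frame[page_frame.index(victim)] = page
--             page_faults += 1
--         use_count[page] = use_count.get(page, 0) + 1
--         last_seen[page] = i
--         history.append(page_frame.copy())
--     return page_faults, history
-- ===== Notes on version B (the rewrite author's own statement) =====
-- stated objective: simpler
-- what changed: Drops the recently-used deque entirely: B keeps a last_seen timestamp dict and picks the MFU victim by a single min over the frame with key (-use_count, last_seen), instead of maintaining an ordered queue with remove/append on every access and scanning it with strict >.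
import Mathlib
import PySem

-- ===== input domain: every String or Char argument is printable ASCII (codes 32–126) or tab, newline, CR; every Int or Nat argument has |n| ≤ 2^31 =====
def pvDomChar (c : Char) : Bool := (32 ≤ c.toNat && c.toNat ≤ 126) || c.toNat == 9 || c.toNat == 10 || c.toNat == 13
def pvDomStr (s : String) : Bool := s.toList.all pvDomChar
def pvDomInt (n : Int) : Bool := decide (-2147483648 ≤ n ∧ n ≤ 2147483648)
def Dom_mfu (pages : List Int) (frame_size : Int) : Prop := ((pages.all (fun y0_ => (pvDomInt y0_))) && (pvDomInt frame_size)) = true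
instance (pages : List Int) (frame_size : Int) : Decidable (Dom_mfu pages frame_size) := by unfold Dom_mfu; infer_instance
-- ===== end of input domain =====

-- B drops A's recently-used deque: it keeps a last_seen timestamp dict and picks the MFU
-- victim by one min over the frame with key (-use_count, last_seen); equal return values on Pre_.

-- ===== PORT A =====
-- state: (page_frame, page_faults, history, use_count, recently_used_queue)
def StateA : Type := List (Option Int) × Int × List (List (Option Int)) × PySem.Dict Int Int × List Int

-- the 'for i in range(len(page_frame)): if page_frame[i] == None: page_frame[i] = page; break' loop
def fillFirstNone : List (Option Int) → Int → Option (List (Option Int))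
  | [], _ => none
  | none :: t, p => some (some p :: t)
  | some x :: t, p => (fillFirstNone t p).map (fun r => some x :: r)

-- 'if page in use_count: use_count[page] += 1 else: use_count[page] = 1'
def ucStepA (uc : PySem.Dict Int Int) (page : Int) : PySem.Dict Int Int :=
  if uc.contains page then uc.modify page 0 (· + 1) else uc.insert page 1

def mfuStepA (st : StateA) (page : Int) : StateA :=
  match st with
  | (frame, faults, hist, uc, q) =>
    if (some page) ∈ frame then
      -- recently_used_queue.remove(page); recently_used_queue.append(page)  (first occurrence)
      let q' := q.erase page ++ [page]
      (frame, faults, hist ++ [frame], ucStepA uc page, q')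
    else
      match fillFirstNone frame page with
      | some frame' =>
        (frame', faults + 1, hist ++ [frame'], ucStepA uc page, q ++ [page])
      | none =>
        -- victim scan over the queue with strict >; use_count[...] read ported as getD _ 0
        -- (defaultdict read: same value; the 0-entry it may insert is never observable here)
        let rc := q.foldl (fun acc pq => if uc.getD pq 0 > acc.2 then (pq, uc.getD pq 0) else acc) (-1, -1)
        let rp := rc.1
        let q' := q.erase rp ++ [page]
        let frame' := frame.set ((PySem.List.index? frame (some rp)).getD 0) (some page)
        (frame', faults + 1, hist ++ [frame'], ucStepA uc page, q')

def mfu (pages : List Int) (frame_size : Int) : Int × List (List (Option Int)) :=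
  let st := pages.foldl mfuStepA (List.replicate frame_size.toNat none, 0, [], PySem.Dict.empty, [])
  (st.2.1, st.2.2.1)

-- ===== PORT B =====
-- state: (page_frame, page_faults, history, use_count, last_seen)
def StateB : Type := List (Option Int) × Int × List (List (Option Int)) × PySem.Dict Int Int × PySem.Dict Int Int

-- key=lambda p: (-use_count[p], last_seen[p]); a None frame entry is unreachable in the min
-- branch (Python would raise KeyError), ported with an arbitrary 0 stand-in
def keyB (uc ls : PySem.Dict Int Int) (o : Option Int) : Int × Int :=
  (-(uc.getD (o.getD 0) 0), ls.getD (o.getD 0) 0)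

-- Python's lexicographic < on the 2-tuples produced by the key
def keyLt (a b : Int × Int) : Bool := a.1 < b.1 || (a.1 == b.1 && a.2 < b.2)

def mfuStepB (st : StateB) (ip : Int × Int) : StateB :=
  match st, ip with
  | (frame, faults, hist, uc, ls), (i, page) =>
    let fp : List (Option Int) × Int :=
      if (some page) ∈ frame then (frame, faults)
      else
        let frame' :=
          if (none : Option Int) ∈ frame then
            frame.set ((PySem.List.index? frame none).getD 0) (some page)
          else
            match frame with
            | [] => frame  -- unreachable: Python's min raises ValueError here; Pre_ excludes it
            | c :: rest =>
              let victim := rest.foldl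
                (fun best x => if keyLt (keyB uc ls x) (keyB uc ls best) then x else best) c
              frame.set ((PySem.List.index? frame victim).getD 0) (some page)
        (frame', faults + 1)
    (fp.1, fp.2, hist ++ [fp.1], uc.insert page (uc.getD page 0 + 1), ls.insert page i)

def mfu_alt (pages : List Int) (frame_size : Int) : Int × List (List (Option Int)) :=
  let st := (PySem.List.enumerate pages 0).foldl mfuStepB
    (List.replicate frame_size.toNat none, 0, [], PySem.Dict.empty, PySem.Dict.empty)
  (st.2.1, st.2.2.1)

-- ===== PRECONDITION & SPEC =====
-- Pre_ excludes frame_size ≤ 0 with a nonempty reference string: there both A and B raise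
-- (A: deque.remove(-1) ValueError; B: min() over an empty frame ValueError).
def Pre_mfu (pages : List Int) (frame_size : Int) : Prop := pages = [] ∨ 1 ≤ frame_size
instance (pages : List Int) (frame_size : Int) : Decidable (Pre_mfu pages frame_size) := by unfold Pre_mfu; infer_instance
def pvWitness_mfu : List Int × Int := ([1, 2, 1, 3, 2, 4, 1], 3)

def Spec_mfu (pages : List Int) (frame_size : Int) (out : Int × List (List (Option Int))) : Prop := out = mfu_alt pages frame_size
instance (pages : List Int) (frame_size : Int) (out : Int × List (List (Option Int))) : Decidable (Spec_mfu pages frame_size out) := by unfold Spec_mfu; infer_instance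

-- ===== CLAIM (what is proved, stated in full; the proofs are below) =====
def Claim_equal_mfu : Prop := ∀ (pages : List Int) (frame_size : Int), Dom_mfu pages frame_size → Pre_mfu pages frame_size → Spec_mfu pages frame_size (mfu pages frame_size)

-- ===== LEMMAS AND PROOFS =====

-- the simulation invariant between A's queue state and B's timestamp state
def MfuInv (F : List (Option Int)) (q : List Int) (ucA ucB ls : PySem.Dict Int Int) (i : Int) : Prop :=
  (∀ x : Int, F.count (some x) = if x ∈ q then 1 else 0) ∧
  q.Pairwise (fun a b => ls.getD a 0 < ls.getD b 0) ∧
  (∀ x ∈ q, ls.getD x 0 < i) ∧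
  (∀ x : Int, ucA.getD x 0 = ucB.getD x 0) ∧
  (∀ x : Int, 0 ≤ ucA.getD x 0)

-- getD view of A's use_count update
theorem ucStepA_getD (uc : PySem.Dict Int Int) (page x : Int) :
    (ucStepA uc page).getD x 0 = if x = page then uc.getD page 0 + 1 else uc.getD x 0 := by
  unfold ucStepA
  by_cases h : uc.contains page = true
  · simp [h, PySem.Dict.getD_modify]
  · simp only [Bool.not_eq_true] at h
    have h0 : uc.getD page 0 = 0 := PySem.Dict.getD_of_not_contains uc 0 h
    simp [h, PySem.Dict.getD_insert, h0]

-- (pre ++ a :: suf).set pre.length b = pre ++ b :: suf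
theorem set_len_append {α : Type} (pre : List α) (a b : α) (suf : List α) :
    (pre ++ a :: suf).set pre.length b = pre ++ b :: suf := by
  induction pre with
  | nil => rfl
  | cons h t ih => simp [ih]

-- the first-None fill loop, expressed through index?
theorem fill_of_mem (F : List (Option Int)) (p : Int) (h : (none : Option Int) ∈ F) :
    fillFirstNone F p = some (F.set ((PySem.List.index? F none).getD 0) (some p)) := by
  induction F with
  | nil => simp at h
  | cons c t ih =>
    match c with
    | none => rw [PySem.List.index?_cons_self]; rfl
    | some x =>
      have ht : (none : Option Int) ∈ t := by simpa using h
      have hs : (PySem.List.index? t none).isSome := (PySem.List.index?_isSome_iff t none).mpr ht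
      obtain ⟨k, hk⟩ := Option.isSome_iff_exists.mp hs
      rw [PySem.List.index?_cons_of_ne t (by simp)]
      simp only [PySem.List.index?_eq_idxOf?] at hk
      simp [fillFirstNone, ih ht, hk]

theorem fill_of_not_mem (F : List (Option Int)) (p : Int) (h : (none : Option Int) ∉ F) :
    fillFirstNone F p = none := by
  induction F with
  | nil => rfl
  | cons c t ih =>
    match c with
    | none => simp at h
    | some x =>
      have ht : (none : Option Int) ∉ t := fun hm => h (List.mem_cons_of_mem _ hm)
      simp [fillFirstNone, ih ht]

-- Prop form of the Python tuple-key comparison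
def kLt (a b : Int × Int) : Prop := a.1 < b.1 ∨ (a.1 = b.1 ∧ a.2 < b.2)

theorem keyLt_iff (a b : Int × Int) : keyLt a b = true ↔ kLt a b := by
  rcases a with ⟨a1, a2⟩; rcases b with ⟨b1, b2⟩
  simp only [keyLt, kLt, Bool.or_eq_true, Bool.and_eq_true, decide_eq_true_eq, beq_iff_eq]

-- 'v strictly beats x' in MFU-then-LRU order
def beats (uc ls : PySem.Dict Int Int) (v x : Int) : Prop :=
  uc.getD x 0 < uc.getD v 0 ∨ (uc.getD x 0 = uc.getD v 0 ∧ ls.getD v 0 < ls.getD x 0)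

-- A's strict-> scan over a queue sorted by last use returns the unique MFU/LRU winner
theorem foldA_char (uc ls : PySem.Dict Int Int) (t : List Int) : ∀ (r : Int),
    (∀ x ∈ t, ls.getD r 0 < ls.getD x 0) →
    t.Pairwise (fun a b => ls.getD a 0 < ls.getD b 0) →
    ∃ v, t.foldl (fun acc pq => if uc.getD pq 0 > acc.2 then (pq, uc.getD pq 0) else acc) (r, uc.getD r 0) = (v, uc.getD v 0) ∧
      v ∈ r :: t ∧ ∀ x ∈ r :: t, x = v ∨ beats uc ls v x := by
  induction t with
  | nil => intro r _ _; exact ⟨r, rfl, by simp, by simp⟩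
  | cons x t ih =>
    intro r hlt hpw
    have hxr : ls.getD r 0 < ls.getD x 0 := hlt x (by simp)
    have hpw' : t.Pairwise (fun a b => ls.getD a 0 < ls.getD b 0) := hpw.tail
    simp only [List.foldl_cons]
    by_cases hc : uc.getD x 0 > uc.getD r 0
    · rw [if_pos hc]
      obtain ⟨v, hfold, hvmem, hbeats⟩ := ih x (fun y hy => (List.pairwise_cons.mp hpw).1 y hy) hpw'
      refine ⟨v, hfold, ?_, ?_⟩
      · simp only [List.mem_cons] at hvmem ⊢; tauto
      · intro z hz
        rcases List.mem_cons.mp hz with rfl | hz'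
        · -- z = r: v beats r
          right
          rcases hbeats x (by simp) with h1 | h1
          · subst h1; left; exact hc
          · unfold beats at h1 ⊢; omega
        · exact hbeats z hz'
    · rw [if_neg hc]
      rw [not_lt] at hc
      obtain ⟨v, hfold, hvmem, hbeats⟩ := ih r (fun y hy => hlt y (List.mem_cons_of_mem _ hy)) hpw'
      refine ⟨v, hfold, ?_, ?_⟩
      · simp only [List.mem_cons] at hvmem ⊢; tauto
      · intro z hz
        rcases List.mem_cons.mp hz with rfl | hz'
        · exact hbeats z (by simp)
        · rcases List.mem_cons.mp hz' with rfl | hz''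
          · -- z = x: r beats x, and v = r or v beats r
            right
            have hrx : beats uc ls r z := by
              unfold beats
              rcases lt_or_eq_of_le hc with h1 | h1
              · left; exact h1
              · right; exact ⟨h1, hxr⟩
            rcases hbeats r (by simp) with h1 | h1
            · subst h1; exact hrx
            · unfold beats at hrx h1 ⊢; omega
          · exact hbeats z (List.mem_cons_of_mem _ hz'')

-- B's running-min over the frame returns a key-minimal element
theorem foldB_char (uc ls : PySem.Dict Int Int) (t : List (Option Int)) : ∀ (b : Option Int),
    ∃ w, t.foldl (fun best x => if keyLt (keyB uc ls x) (keyB uc ls best) then x else best) b = w ∧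
      w ∈ b :: t ∧ ∀ x ∈ b :: t, kLt (keyB uc ls w) (keyB uc ls x) ∨ keyB uc ls w = keyB uc ls x := by
  induction t with
  | nil =>
    intro b
    refine ⟨b, rfl, by simp, ?_⟩
    intro x hx
    rcases List.mem_cons.mp hx with rfl | hx'
    · right; rfl
    · simp at hx'
  | cons x t ih =>
    intro b
    simp only [List.foldl_cons]
    by_cases hc : keyLt (keyB uc ls x) (keyB uc ls b) = true
    · rw [if_pos hc]
      rw [keyLt_iff] at hc
      obtain ⟨w, hfold, hwmem, hmin⟩ := ih x
      refine ⟨w, hfold, ?_, ?_⟩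
      · simp only [List.mem_cons] at hwmem ⊢; tauto
      · intro z hz
        rcases List.mem_cons.mp hz with rfl | hz'
        · -- z = b
          have hwx := hmin x (by simp)
          unfold kLt at hc hwx ⊢
          rcases hwx with h1 | h1
          · left; omega
          · rw [h1]; left; exact hc
        · exact hmin z hz'
    · rw [if_neg hc]
      have hc' : ¬ kLt (keyB uc ls x) (keyB uc ls b) := by
        rw [← keyLt_iff]; simpa using hc
      obtain ⟨w, hfold, hwmem, hmin⟩ := ih b
      refine ⟨w, hfold, ?_, ?_⟩
      · simp only [List.mem_cons] at hwmem ⊢; tauto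
      · intro z hz
        rcases List.mem_cons.mp hz with rfl | hz'
        · exact hmin z (by simp)
        · rcases List.mem_cons.mp hz' with rfl | hz''
          · have hwb := hmin b (by simp)
            unfold kLt at hc' hwb ⊢
            simp only [Prod.ext_iff] at hwb hc' ⊢
            omega
          · exact hmin z (List.mem_cons_of_mem _ hz'')

-- appending the just-used page keeps the queue sorted by last use
theorem pairwise_snoc_ls (ls : PySem.Dict Int Int) (l : List Int) (page i : Int)
    (hpw : l.Pairwise (fun a b => ls.getD a 0 < ls.getD b 0))
    (hl : ∀ x ∈ l, ls.getD x 0 < i ∧ x ≠ page) :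
    (l ++ [page]).Pairwise (fun a b => (ls.insert page i).getD a 0 < (ls.insert page i).getD b 0) := by
  rw [List.pairwise_append]
  refine ⟨?_, by simp, ?_⟩
  · refine hpw.imp_of_mem ?_
    intro a b ha hb hab
    rw [PySem.Dict.getD_insert, PySem.Dict.getD_insert]
    rw [if_neg (hl a ha).2, if_neg (hl b hb).2]
    exact hab
  · intro a ha b hb
    simp only [List.mem_singleton] at hb
    subst hb
    rw [PySem.Dict.getD_insert, PySem.Dict.getD_insert]
    rw [if_neg (hl a ha).2, if_pos rfl]
    exact (hl a ha).1

theorem count_mid (pre suf : List (Option Int)) (a : Option Int) (x : Int) :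
    (pre ++ a :: suf).count (some x) = pre.count (some x) + suf.count (some x) + (if a = some x then 1 else 0) := by
  simp only [List.count_append, List.count_cons, beq_iff_eq]
  omega

-- the last four MfuInv components after one step, shared by all three branches
theorem inv_tail (q l : List Int) (ucA ucB ls : PySem.Dict Int Int) (i page : Int)
    (hlsle : ∀ x ∈ q, ls.getD x 0 < i)
    (hucEq : ∀ x : Int, ucA.getD x 0 = ucB.getD x 0)
    (hucPos : ∀ x : Int, 0 ≤ ucA.getD x 0)
    (hsub : ∀ x ∈ l, x ∈ q ∧ x ≠ page)
    (hlp : l.Pairwise (fun a b => ls.getD a 0 < ls.getD b 0)) :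
    (l ++ [page]).Pairwise (fun a b => (ls.insert page i).getD a 0 < (ls.insert page i).getD b 0) ∧
    (∀ x ∈ l ++ [page], (ls.insert page i).getD x 0 < i + 1) ∧
    (∀ x : Int, (ucStepA ucA page).getD x 0 = (ucB.insert page (ucB.getD page 0 + 1)).getD x 0) ∧
    (∀ x : Int, 0 ≤ (ucStepA ucA page).getD x 0) := by
  refine ⟨?_, ?_, ?_, ?_⟩
  · exact pairwise_snoc_ls ls l page i hlp
      (fun x hx => ⟨hlsle x (hsub x hx).1, (hsub x hx).2⟩)
  · intro x hx
    rw [PySem.Dict.getD_insert]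
    rcases List.mem_append.mp hx with hx' | hx'
    · rw [if_neg (hsub x hx').2]
      have := hlsle x (hsub x hx').1
      omega
    · simp only [List.mem_singleton] at hx'
      rw [if_pos hx']
      omega
  · intro x
    rw [ucStepA_getD, PySem.Dict.getD_insert, hucEq, hucEq]
  · intro x
    rw [ucStepA_getD]
    have h1 := hucPos x
    have h2 := hucPos page
    split <;> omega

theorem mfu_step_sim (F : List (Option Int)) (q : List Int) (ucA ucB ls : PySem.Dict Int Int)
    (i : Int) (faults : Int) (hist : List (List (Option Int))) (page : Int)
    (hInv : MfuInv F q ucA ucB ls i) (hF : F ≠ []) :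
    ∃ F' q' ucA' ucB' ls' faults' hist',
      mfuStepA (F, faults, hist, ucA, q) page = (F', faults', hist', ucA', q') ∧
      mfuStepB (F, faults, hist, ucB, ls) (i, page) = (F', faults', hist', ucB', ls') ∧
      MfuInv F' q' ucA' ucB' ls' (i + 1) ∧ F' ≠ [] := by
  obtain ⟨hcount, hpair, hlsle, hucEq, hucPos⟩ := hInv
  have hmem : ∀ x : Int, x ∈ q ↔ some x ∈ F := by
    intro x
    rw [← List.count_pos_iff (a := some x) (l := F), hcount x]
    by_cases hx : x ∈ q <;> simp [hx]
  have hnodup : q.Nodup := by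
    refine hpair.imp ?_
    intro a b hab he
    subst he
    exact lt_irrefl _ hab
  by_cases hhit : (some page) ∈ F
  · -- page hit: frame unchanged, queue reordered
    have hq : page ∈ q := (hmem page).mpr hhit
    obtain ⟨hp2, hp3, hp4, hp5⟩ := inv_tail q (q.erase page) ucA ucB ls i page hlsle hucEq hucPos
      (fun x hx => ((hnodup.mem_erase_iff).mp hx).symm)
      (hpair.sublist (List.erase_sublist))
    refine ⟨F, q.erase page ++ [page], ucStepA ucA page, ucB.insert page (ucB.getD page 0 + 1),
      ls.insert page i, faults, hist ++ [F], by simp [mfuStepA, hhit], by simp [mfuStepB, hhit], ?_, hF⟩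
    refine ⟨?_, hp2, hp3, hp4, hp5⟩
    intro x
    have hiff : x ∈ q.erase page ++ [page] ↔ x ∈ q := by
      by_cases hx : x = page
      · subst hx; simp [hq]
      · simp [List.mem_append, hnodup.mem_erase_iff, hx]
    rw [hcount x]
    by_cases hx : x ∈ q
    · rw [if_pos hx, if_pos (hiff.mpr hx)]
    · rw [if_neg hx, if_neg (fun hq' => hx (hiff.mp hq'))]
  · have hpage : page ∉ q := fun h => hhit ((hmem page).mp h)
    by_cases hnone : (none : Option Int) ∈ F
    · -- fault with a free slot
      have hs : (PySem.List.index? F none).isSome := (PySem.List.index?_isSome_iff F none).mpr hnone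
      obtain ⟨k, hk⟩ := Option.isSome_iff_exists.mp hs
      obtain ⟨pre, suf, hFeq, hklen, hnpre⟩ := (PySem.List.index?_eq_some_iff F none k).mp hk
      have hF' : F.set ((PySem.List.index? F none).getD 0) (some page) = pre ++ some page :: suf := by
        rw [hk]
        subst hklen
        rw [hFeq]
        exact set_len_append pre none (some page) suf
      obtain ⟨hp2, hp3, hp4, hp5⟩ := inv_tail q q ucA ucB ls i page hlsle hucEq hucPos
        (fun x hx => ⟨hx, fun he => hpage (he ▸ hx)⟩) hpair
      refine ⟨F.set ((PySem.List.index? F none).getD 0) (some page), q ++ [page],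
        ucStepA ucA page, ucB.insert page (ucB.getD page 0 + 1), ls.insert page i,
        faults + 1, hist ++ [F.set ((PySem.List.index? F none).getD 0) (some page)],
        by simp [mfuStepA, hhit, fill_of_mem F page hnone],
        by simp [mfuStepB, hhit, hnone], ?_, by rw [hF']; simp⟩
      refine ⟨?_, hp2, hp3, hp4, hp5⟩
      intro x
      rw [hF', count_mid]
      have hc := hcount x
      rw [hFeq, count_mid] at hc
      simp only [List.mem_append, List.mem_singleton]
      rw [if_neg (by simp : ¬ ((none : Option Int) = some x))] at hc
      by_cases hx : x = page
      · subst hx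
        rw [if_neg hpage] at hc
        rw [if_pos rfl, if_pos (Or.inr rfl)]
        omega
      · rw [if_neg (by simp [Ne.symm hx] : ¬ ((some page : Option Int) = some x))]
        by_cases hq' : x ∈ q
        · rw [if_pos hq'] at hc
          rw [if_pos (Or.inl hq')]
          omega
        · rw [if_neg hq'] at hc
          rw [if_neg (by tauto)]
          omega
    · -- fault, frame full: MFU eviction
      obtain ⟨c, rest, hFc⟩ := List.exists_cons_of_ne_nil hF
      have hcne : c ≠ none := fun h => hnone (by rw [hFc, h]; simp)
      obtain ⟨c0, hc0⟩ := Option.ne_none_iff_exists'.mp hcne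
      have hc0q : c0 ∈ q := (hmem c0).mpr (by rw [hFc, hc0]; simp)
      have hqne : q ≠ [] := by intro h; rw [h] at hc0q; simp at hc0q
      obtain ⟨q0, qt, hqc⟩ := List.exists_cons_of_ne_nil hqne
      have hpairq : (q0 :: qt).Pairwise (fun a b => ls.getD a 0 < ls.getD b 0) := hqc ▸ hpair
      obtain ⟨v, hfoldA, hvmem, hbeats⟩ := foldA_char ucA ls qt q0
        (List.pairwise_cons.mp hpairq).1 hpairq.tail
      have hvq : v ∈ q := hqc ▸ hvmem
      have hfold : q.foldl (fun acc pq => if ucA.getD pq 0 > acc.2 then (pq, ucA.getD pq 0) else acc) ((-1 : Int), (-1 : Int)) = (v, ucA.getD v 0) := by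
        rw [hqc, List.foldl_cons, if_pos (by have := hucPos q0; simp; omega)]
        exact hfoldA
      obtain ⟨w, hfoldB, hwmem, hwmin⟩ := foldB_char ucB ls rest c
      have hwF : w ∈ F := by rw [hFc]; exact hwmem
      have hwne : w ≠ none := fun h => hnone (h ▸ hwF)
      obtain ⟨p, hp⟩ := Option.ne_none_iff_exists'.mp hwne
      have hpq : p ∈ q := (hmem p).mpr (hp ▸ hwF)
      have hkey : ∀ x : Int, keyB ucB ls (some x) = (-(ucA.getD x 0), ls.getD x 0) := by
        intro x; simp [keyB, hucEq]
      have hsvF : some v ∈ F := (hmem v).mp hvq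
      have hpv : p = v := by
        rcases hbeats p (hqc ▸ hpq) with h | h
        · exact h
        · exfalso
          have h2 := hwmin (some v) (hFc ▸ hsvF)
          rw [hp, hkey, hkey] at h2
          unfold beats at h
          unfold kLt at h2
          simp only [Prod.ext_iff] at h2
          omega
      have hw : w = some v := by rw [hp, hpv]
      have hvne : v ≠ page := fun h => hpage (h ▸ hvq)
      have hs : (PySem.List.index? F (some v)).isSome := (PySem.List.index?_isSome_iff F (some v)).mpr hsvF
      obtain ⟨k, hk⟩ := Option.isSome_iff_exists.mp hs
      obtain ⟨pre, suf, hFeq, hklen, hnpre⟩ := (PySem.List.index?_eq_some_iff F (some v) k).mp hk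
      have hF' : F.set ((PySem.List.index? F (some v)).getD 0) (some page) = pre ++ some page :: suf := by
        rw [hk]
        subst hklen
        rw [hFeq]
        exact set_len_append pre (some v) (some page) suf
      obtain ⟨hp2, hp3, hp4, hp5⟩ := inv_tail q (q.erase v) ucA ucB ls i page hlsle hucEq hucPos
        (fun x hx => ⟨((hnodup.mem_erase_iff).mp hx).2,
          fun he => hpage (he ▸ ((hnodup.mem_erase_iff).mp hx).2)⟩)
        (hpair.sublist (List.erase_sublist))
      have hcv := hcount v
      rw [hFeq, count_mid, if_pos rfl, if_pos hvq] at hcv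
      refine ⟨F.set ((PySem.List.index? F (some v)).getD 0) (some page), q.erase v ++ [page],
        ucStepA ucA page, ucB.insert page (ucB.getD page 0 + 1), ls.insert page i,
        faults + 1, hist ++ [F.set ((PySem.List.index? F (some v)).getD 0) (some page)],
        ?_, ?_, ?_, by rw [hF']; simp⟩
      · simp [mfuStepA, hhit, fill_of_not_mem F page hnone, hfold]
      · have hhit' : (some page) ∉ c :: rest := by rw [← hFc]; exact hhit
        have hnone' : (none : Option Int) ∉ c :: rest := by rw [← hFc]; exact hnone
        rw [hFc]
        simp [mfuStepB, hhit', hnone', hfoldB, hw]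
      · refine ⟨?_, hp2, hp3, hp4, hp5⟩
        intro x
        rw [hF', count_mid]
        have hc := hcount x
        rw [hFeq, count_mid] at hc
        simp only [List.mem_append, List.mem_singleton, hnodup.mem_erase_iff]
        by_cases hx : x = page
        · rw [if_neg (by simp [hx]; exact hvne), if_neg (fun hq' => hpage (hx ▸ hq'))] at hc
          rw [if_pos (by rw [hx]), if_pos (Or.inr hx)]
          omega
        · rw [if_neg (by simp; exact fun he => hx he.symm)]
          by_cases hxv : x = v
          · rw [hxv] at hc ⊢
            rw [if_pos rfl, if_pos hvq] at hc
            rw [if_neg (by simp [hvne])]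
            omega
          · rw [if_neg (by simp; exact fun he => hxv he.symm)] at hc
            by_cases hq' : x ∈ q
            · rw [if_pos hq'] at hc
              rw [if_pos (Or.inl ⟨hxv, hq'⟩)]
              omega
            · rw [if_neg hq'] at hc
              rw [if_neg (by tauto)]
              omega

theorem mfu_loop_sim (pages : List Int) (F : List (Option Int)) (q : List Int)
    (ucA ucB ls : PySem.Dict Int Int) (i : Int) (faults : Int) (hist : List (List (Option Int)))
    (hInv : MfuInv F q ucA ucB ls i) (hF : F ≠ []) :
    (pages.foldl mfuStepA (F, faults, hist, ucA, q)).2.1 = ((PySem.List.enumerate pages i).foldl mfuStepB (F, faults, hist, ucB, ls)).2.1 ∧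
    (pages.foldl mfuStepA (F, faults, hist, ucA, q)).2.2.1 = ((PySem.List.enumerate pages i).foldl mfuStepB (F, faults, hist, ucB, ls)).2.2.1 := by
  induction pages generalizing F q ucA ucB ls i faults hist with
  | nil => simp [PySem.List.enumerate_nil]
  | cons p t ih =>
    obtain ⟨F', q', ucA', ucB', ls', faults', hist', hA, hB, hInv', hF'⟩ :=
      mfu_step_sim F q ucA ucB ls i faults hist p hInv hF
    rw [PySem.List.enumerate_cons]
    simp only [List.foldl_cons, hA, hB]
    exact ih F' q' ucA' ucB' ls' (i + 1) faults' hist' hInv' hF' 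

theorem replicate_count_some (n : Nat) (x : Int) :
    (List.replicate n (none : Option Int)).count (some x) = 0 := by
  simp [List.count_replicate]

-- ===== VERDICT (by name: the statement is the Claim_ definition above) =====
theorem mfu_spec : Claim_equal_mfu := by
  intro pages fs _ hpre
  unfold Spec_mfu
  rcases hpre with hnil | hfs
  · subst hnil; rfl
  · have hF : List.replicate fs.toNat (none : Option Int) ≠ [] := by
      have : 1 ≤ fs.toNat := by omega
      simp [List.replicate_eq_nil_iff]; omega
    have hInv : MfuInv (List.replicate fs.toNat none) [] PySem.Dict.empty PySem.Dict.empty PySem.Dict.empty 0 := by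
      refine ⟨?_, ?_, ?_, ?_, ?_⟩
      · intro x; simp [replicate_count_some]
      · simp
      · simp
      · intro x; rfl
      · intro x; simp [PySem.Dict.getD_empty]
    have h := mfu_loop_sim pages (List.replicate fs.toNat none) [] PySem.Dict.empty PySem.Dict.empty PySem.Dict.empty 0 0 [] hInv hF
    unfold mfu mfu_alt
    exact Prod.ext h.1 h.2
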